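-- pv_equiv track=rewrite | github.com/MSC2016/local-secrets-manager | app/web_support.py | coerce_expanded_list
-- ===== SOURCE A (Python) =====
-- def coerce_expanded_list(value) -> list[str]:
--     if value is None:
--         return []
--     if isinstance(value, str):
--         candidates = [value]
--     else:
--         candidates = list(value)
--
--     expanded: list[str] = []
--     seen: set[str] = set()
--     for candidate in candidates:
--         if not candidate:
--             continue
--         for part in str(candidate).split(","):
--             name = part.strip()
--             if name and name not in seen:
--                 seen.add(name)
--                 expanded.append(name)
--     return expanded
-- ===== SOURCE B (Python) =====
-- def coerce_expanded_list(value) -> list[str]: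
--     if value is None:
--         return []
--     if isinstance(value, str):
--         candidates = [value]
--     else:
--         candidates = list(value)
--
--     # flatten: strip every comma-separated piece of the truthy candidates
--     names = [p.strip() for c in candidates if c for p in str(c).split(",")]
--     names = [n for n in names if n]
--
--     # dedup without any seen-set: take the head, delete its later occurrences,
--     # and repeat on what is left (first occurrences survive in order)
--     out: list[str] = []
--     while names:
--         head = names[0]
--         out.append(head)
--         names = [n for n in names[1:] if n != head]
--     return out
-- ===== Notes on version B (the rewrite author's own statement) =====
-- stated objective: alternative
-- what changed: B drops A's interleaved seen-set pass entirely: it first flattens all comma-split stripped pieces of the truthy candidates into one list, then deduplicates by repeatedly taking the head and deleting its later occurrences from the remainder (filter-tail dedup), so no membership set is maintained.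
import Mathlib
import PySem

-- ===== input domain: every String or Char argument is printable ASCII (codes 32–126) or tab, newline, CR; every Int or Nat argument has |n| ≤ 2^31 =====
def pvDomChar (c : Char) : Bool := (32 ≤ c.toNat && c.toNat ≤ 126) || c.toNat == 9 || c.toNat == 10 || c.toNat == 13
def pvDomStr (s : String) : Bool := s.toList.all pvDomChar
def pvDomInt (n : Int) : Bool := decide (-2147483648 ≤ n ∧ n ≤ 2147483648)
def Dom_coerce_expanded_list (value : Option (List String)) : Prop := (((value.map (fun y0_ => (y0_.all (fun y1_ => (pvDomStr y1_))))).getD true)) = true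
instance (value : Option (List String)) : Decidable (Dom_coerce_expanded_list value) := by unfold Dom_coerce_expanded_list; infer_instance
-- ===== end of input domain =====

-- B replaces A's single interleaved pass with a seen-set by: flatten all comma-split
-- stripped pieces first, then dedup with NO set at all — repeatedly take the head and
-- delete its later occurrences from the remainder.  Objective: alternative algorithm.

-- shared primitive: s.split(",") — nonempty literal separator, exact (PySem.Chars.splitOn is s.split(sep) for sep ≠ "")
def pvSplitComma (s : String) : List String :=
  (PySem.Chars.splitOn s.toList ",".toList).map String.ofList

-- ===== PORT A =====
def coerce_expanded_list (value : Option (List String)) : List String :=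
  match value with
  | none => []
  | some candidates =>
    let res := candidates.foldl
      (fun (st : List String × PySem.Set String) candidate =>
        if candidate = "" then st
        else (pvSplitComma candidate).foldl
          (fun (st : List String × PySem.Set String) part =>
            let name := PySem.Str.strip part
            if name ≠ "" ∧ ¬ PySem.Set.contains st.2 name then
              (st.1 ++ [name], PySem.Set.add st.2 name)
            else st) st)
      ([], PySem.Set.empty)
    res.1

-- ===== PORT B =====
-- Source B's while loop: take the head, filter it out of the tail, recurse on what is left.
def pvDedupFilter (names : List String) : List String :=
  match names with
  | [] => []
  | head :: rest => head :: pvDedupFilter (rest.filter (fun n => n ≠ head))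
termination_by names.length
decreasing_by
  simp only [List.length_unattach, List.length_cons, Nat.lt_succ_iff]
  exact (List.length_filter_le _ _).trans List.length_attach.le

def coerce_expanded_list_alt (value : Option (List String)) : List String :=
  match value with
  | none => []
  | some candidates =>
    let names := candidates.flatMap
      (fun c => if c ≠ "" then (pvSplitComma c).map PySem.Str.strip else [])
    pvDedupFilter (names.filter (fun n => n ≠ ""))

-- ===== PRECONDITION & SPEC =====
def Spec_coerce_expanded_list (value : Option (List String)) (out : List String) : Prop := out = coerce_expanded_list_alt value
instance (value : Option (List String)) (out : List String) : Decidable (Spec_coerce_expanded_list value out) := by unfold Spec_coerce_expanded_list; infer_instance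

-- ===== CLAIM (what is proved, stated in full; the proofs are below) =====
def Claim_equal_coerce_expanded_list : Prop := ∀ (value : Option (List String)), Dom_coerce_expanded_list value → Spec_coerce_expanded_list value (coerce_expanded_list value)

-- ===== LEMMAS AND PROOFS =====

-- A's inner body, written over the already-stripped name.
def pvStep (st : List String × PySem.Set String) (name : String) : List String × PySem.Set String :=
  if name ≠ "" ∧ ¬ PySem.Set.contains st.2 name then (st.1 ++ [name], PySem.Set.add st.2 name) else st

-- the pieces an individual candidate contributes (none when it is falsy)
def pvPieces (c : String) : List String := if c ≠ "" then pvSplitComma c else []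

-- A's nested fold over candidates = a single fold of pvStep∘strip over the flattened pieces
theorem pvFlatten (cs : List String) (st : List String × PySem.Set String) :
    cs.foldl
      (fun (st : List String × PySem.Set String) candidate =>
        if candidate = "" then st
        else (pvSplitComma candidate).foldl
          (fun (st : List String × PySem.Set String) part =>
            let name := PySem.Str.strip part
            if name ≠ "" ∧ ¬ PySem.Set.contains st.2 name then
              (st.1 ++ [name], PySem.Set.add st.2 name)
            else st) st) st
    = (cs.flatMap pvPieces).foldl (fun st part => pvStep st (PySem.Str.strip part)) st := by
  induction cs generalizing st with
  | nil => rfl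
  | cons c cs ih =>
    simp only [List.foldl_cons, List.flatMap_cons, List.foldl_append]
    by_cases hc : c = ""
    · rw [if_pos hc, ih]
      simp [pvPieces, hc]
    · rw [if_neg hc, ih]
      have h1 : pvPieces c = pvSplitComma c := by simp [pvPieces, hc]
      rw [h1]
      rfl

-- empty names are identity steps: fold over the filtered list
theorem pvStep_filter (ns : List String) (st : List String × PySem.Set String) :
    ns.foldl pvStep st = (ns.filter (fun n => n ≠ "")).foldl pvStep st := by
  induction ns generalizing st with
  | nil => rfl
  | cons n ns ih =>
    by_cases hn : n = ""
    · subst hn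
      have h0 : pvStep st "" = st := by simp [pvStep]
      simp [h0, ih]
    · simp [hn, ih]

-- on names all ≠ "", pvStep keeps both components equal and both are Set.add
theorem pvStep_diag (ns : List String) (e : List String) (h : ∀ n ∈ ns, n ≠ "") :
    ns.foldl pvStep (e, e) = (ns.foldl PySem.Set.add e, ns.foldl PySem.Set.add e) := by
  induction ns generalizing e with
  | nil => rfl
  | cons n ns ih =>
    have hn : n ≠ "" := h n (by simp)
    have hstep : pvStep (e, e) n = (PySem.Set.add e n, PySem.Set.add e n) := by
      by_cases hc : n ∈ e <;>
        simp [pvStep, PySem.Set.add, hn, hc]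
    simp only [List.foldl_cons, hstep]
    exact ih _ (fun m hm => h m (by simp [hm]))

-- the seen-set fold = filter-tail dedup: foldl add s t appends exactly the first
-- occurrences of the elements of t not already in s (fuel n bounds t.length)
theorem pvFoldlAdd_eq_dedupFilter_aux (n : Nat) (t : List String) (s : List String)
    (hn : t.length <= n) :
    t.foldl PySem.Set.add s = s ++ pvDedupFilter (t.filter (fun y => y ∉ s)) := by
  induction n generalizing t s with
  | zero =>
    have ht : t = [] := List.eq_nil_of_length_eq_zero (Nat.le_zero.mp hn)
    subst ht; simp [pvDedupFilter]
  | succ n ih =>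
    cases t with
    | nil => simp [pvDedupFilter]
    | cons x t' =>
      have hlen : t'.length <= n := by simpa using hn
      simp only [List.foldl_cons, List.filter_cons]
      by_cases hx : x ∈ s
      · rw [if_neg (by simp [hx])]
        have hadd : PySem.Set.add s x = s := by simp [PySem.Set.add, hx]
        rw [hadd, ih t' s hlen]
      · rw [if_pos (by simp [hx])]
        have hadd : PySem.Set.add s x = s ++ [x] := by simp [PySem.Set.add, hx]
        rw [hadd, ih t' (s ++ [x]) hlen]
        have hq : pvDedupFilter (x :: t'.filter (fun y => y ∉ s))
            = x :: pvDedupFilter ((t'.filter (fun y => y ∉ s)).filter (fun m => m ≠ x)) := by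
          simp [pvDedupFilter]
        rw [hq, List.append_assoc, List.singleton_append]
        congr 2
        rw [List.filter_filter]
        apply congrArg
        apply List.filter_congr
        intro y _
        by_cases hyx : y = x <;> by_cases hys : y ∈ s <;> simp_all

theorem pvFoldlAdd_eq_dedupFilter (t : List String) :
    t.foldl PySem.Set.add [] = pvDedupFilter t := by
  have h := pvFoldlAdd_eq_dedupFilter_aux t.length t [] le_rfl
  simpa using h

-- B's flattened names = strip mapped over A's flattened pieces
theorem pvNames_eq (cs : List String) :
    cs.flatMap (fun c => if c ≠ "" then (pvSplitComma c).map PySem.Str.strip else [])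
      = (cs.flatMap pvPieces).map PySem.Str.strip := by
  induction cs with
  | nil => rfl
  | cons c cs ih =>
    simp only [List.flatMap_cons, ih]
    by_cases hc : c = "" <;> simp [pvPieces, hc]

-- ===== VERDICT (by name: the statement is the Claim_ definition above) =====
theorem coerce_expanded_list_spec : Claim_equal_coerce_expanded_list := by
  intro value _hdom
  unfold Spec_coerce_expanded_list coerce_expanded_list coerce_expanded_list_alt
  cases value with
  | none => rfl
  | some cs =>
    simp only [pvFlatten cs ([], PySem.Set.empty), pvNames_eq cs]
    rw [← List.foldl_map (f := PySem.Str.strip) (g := pvStep), pvStep_filter]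
    have hall : ∀ n ∈ ((cs.flatMap pvPieces).map PySem.Str.strip).filter (fun n => n ≠ ""),
        n ≠ "" := by
      intro n hn
      simpa using (List.of_mem_filter hn)
    have he : PySem.Set.empty = ([] : List String) := rfl
    rw [he, pvStep_diag _ [] hall]
    rw [pvFoldlAdd_eq_dedupFilter]
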